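-- pv_equiv track=rewrite | github.com/Dreed115/Sample-Proyects-and-Utils | Python-practice/FlippingMatrix.py | flipmatrix
-- ===== SOURCE A (Python) =====
-- def suma(A, matrix):
--     B = [matrix[A[0][0]][A[0][1]], matrix[A[1][0]][A[1][1]], matrix[A[2][0]][A[2][1]], matrix[A[3][0]][A[3][1]]]
--     return max(B)
--
-- def summat(A, B):
--     C = []
--     for i in range(len(A)):
--         C.append((int(A[i][0] + B[i][0]), int(A[i][1] + B[i][1])))
--     return C
--
-- def flipmatrix(matrix):
--     n = int(len(matrix))
--     le = int(len(matrix)/2)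
--     sum = 0
--     A = [(0,0), (0, n-1), (n-1, 0), (n-1, n-1)]
--
--
--     rowA = [(0,1), (0,-1), (0,1), (0,-1)]
--     rowb = [(0,-1), (0,+1), (0,-1), (0,+1)]
--
--     colA = [(1,0), (1,0), (-1,0), (-1,0)]
--
--     for i in range(le):
--         for j in range(le):
--             sum += suma(A, matrix)
--             A = summat(A,rowA)
--         for j in range(le):
--             A = summat(A,rowb)
--         A = summat(A, colA)
--
--     return sum
-- ===== SOURCE B (Python) =====
-- def flipmatrix(matrix):
--     n = len(matrix)
--     le = n // 2
--     total = 0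
--     for i in range(le):
--         for j in range(le):
--             total += max(matrix[i][j], matrix[i][n - 1 - j],
--                          matrix[n - 1 - i][j], matrix[n - 1 - i][n - 1 - j])
--     return total
-- ===== Notes on version B (the rewrite author's own statement) =====
-- stated objective: simpler
-- what changed: Dropped the sliding list of four coordinate tuples and the suma/summat vector-addition helpers; B is a bare nested loop that computes the four symmetric indices directly from i and j and accumulates the sum.
import Mathlib
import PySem

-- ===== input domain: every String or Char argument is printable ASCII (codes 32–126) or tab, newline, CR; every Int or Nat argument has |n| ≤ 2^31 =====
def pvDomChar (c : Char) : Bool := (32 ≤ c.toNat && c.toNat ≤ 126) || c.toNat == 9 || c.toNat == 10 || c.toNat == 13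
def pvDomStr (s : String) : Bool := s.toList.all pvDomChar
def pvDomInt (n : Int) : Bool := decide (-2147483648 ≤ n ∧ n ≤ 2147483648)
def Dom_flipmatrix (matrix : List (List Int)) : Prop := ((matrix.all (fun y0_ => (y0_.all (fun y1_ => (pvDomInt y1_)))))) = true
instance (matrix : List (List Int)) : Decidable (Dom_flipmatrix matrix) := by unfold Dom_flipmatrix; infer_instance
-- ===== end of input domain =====

-- B replaces A's sliding list of four coordinate tuples (and the suma/summat helpers)
-- by a bare nested loop that computes the four symmetric indices directly from i and j.
-- Equivalence of RETURN values on Pre_ (the inputs where the Python A returns normally).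

-- ===== PORT A =====

-- matrix[r][c]: both indices are produced nonnegative and in range under Pre_;
-- pyGet? is exact Python indexing, the .getD defaults are never reached on Pre_.
def pvCellA (matrix : List (List Int)) (p : Int × Int) : Int :=
  (PySem.List.pyGet? ((PySem.List.pyGet? matrix p.1).getD []) p.2).getD 0

-- suma(A, matrix): B = [matrix[A[k][0]][A[k][1]] for k in 0..3]; return max(B)
def pvSuma (A : List (Int × Int)) (matrix : List (List Int)) : Int :=
  let B := [pvCellA matrix (A.getD 0 (0, 0)), pvCellA matrix (A.getD 1 (0, 0)),
            pvCellA matrix (A.getD 2 (0, 0)), pvCellA matrix (A.getD 3 (0, 0))]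
  (PySem.List.max? B id).getD 0

-- summat(A, B): componentwise vector addition, appending pair by pair
def pvSummat (A B : List (Int × Int)) : List (Int × Int) :=
  (List.range A.length).foldl
    (fun C i => C ++ [((A.getD i (0, 0)).1 + (B.getD i (0, 0)).1,
                       (A.getD i (0, 0)).2 + (B.getD i (0, 0)).2)]) []

def pvRowA : List (Int × Int) := [(0, 1), (0, -1), (0, 1), (0, -1)]
def pvRowb : List (Int × Int) := [(0, -1), (0, 1), (0, -1), (0, 1)]
def pvColA : List (Int × Int) := [(1, 0), (1, 0), (-1, 0), (-1, 0)]

def flipmatrix (matrix : List (List Int)) : Int :=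
  let n : Int := matrix.length
  let le : Nat := matrix.length / 2   -- int(len(matrix)/2) = floor for nonnegative length
  let A0 : List (Int × Int) := [(0, 0), (0, n - 1), (n - 1, 0), (n - 1, n - 1)]
  let res := (List.range le).foldl
    (fun (st : Int × List (Int × Int)) _ =>
      let st2 := (List.range le).foldl
        (fun (st : Int × List (Int × Int)) _ =>
          (st.1 + pvSuma st.2 matrix, pvSummat st.2 pvRowA)) st
      let A2 := (List.range le).foldl (fun A _ => pvSummat A pvRowb) st2.2
      (st2.1, pvSummat A2 pvColA)) (0, A0)
  res.1

-- ===== PORT B =====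

-- matrix[r][c] for B, same exact Python indexing
def pvCellB (matrix : List (List Int)) (r c : Int) : Int :=
  (PySem.List.pyGet? ((PySem.List.pyGet? matrix r).getD []) c).getD 0

def flipmatrix_alt (matrix : List (List Int)) : Int :=
  let n : Int := matrix.length
  let le : Nat := matrix.length / 2   -- n // 2
  (List.range le).foldl
    (fun (total : Int) (i : Nat) =>
      (List.range le).foldl
        (fun (total : Int) (j : Nat) =>
          total + max (max (max (pvCellB matrix i j) (pvCellB matrix i (n - 1 - j)))
                           (pvCellB matrix (n - 1 - i) j))
                      (pvCellB matrix (n - 1 - i) (n - 1 - j))) total) 0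

-- ===== PRECONDITION & SPEC =====
-- Pre_ excludes exactly the inputs where Python A raises IndexError: some accessed row
-- (row i or row n-1-i, i < n//2) is shorter than n, so column n-1 is out of range.
def Pre_flipmatrix (matrix : List (List Int)) : Prop :=
  ∀ i ∈ List.range (matrix.length / 2),
    matrix.length ≤ (matrix.getD i []).length ∧
    matrix.length ≤ (matrix.getD (matrix.length - 1 - i) []).length
instance (matrix : List (List Int)) : Decidable (Pre_flipmatrix matrix) := by
  unfold Pre_flipmatrix; infer_instance

def pvWitness_flipmatrix : List (List Int) := [[1, 2], [3, 4]]

def Spec_flipmatrix (matrix : List (List Int)) (out : Int) : Prop := out = flipmatrix_alt matrix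
instance (matrix : List (List Int)) (out : Int) : Decidable (Spec_flipmatrix matrix out) := by
  unfold Spec_flipmatrix; infer_instance

-- ===== CLAIM (what is proved, stated in full; the proofs are below) =====
def Claim_equal_flipmatrix : Prop := ∀ (matrix : List (List Int)), Dom_flipmatrix matrix → Pre_flipmatrix matrix → Spec_flipmatrix matrix (flipmatrix matrix)

-- ===== LEMMAS AND PROOFS =====

-- the coordinate list A holds after i outer and j inner steps
def pvCoord (n i j : Int) : List (Int × Int) :=
  [(i, j), (i, n - 1 - j), (n - 1 - i, j), (n - 1 - i, n - 1 - j)]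

lemma summat_rowA (n i j : Int) : pvSummat (pvCoord n i j) pvRowA = pvCoord n i (j + 1) := by
  simp [pvSummat, pvCoord, pvRowA, List.range_succ, Prod.ext_iff]
  omega

lemma summat_rowb (n i j : Int) : pvSummat (pvCoord n i j) pvRowb = pvCoord n i (j - 1) := by
  simp [pvSummat, pvCoord, pvRowb, List.range_succ, Prod.ext_iff]
  omega

lemma summat_colA (n i j : Int) : pvSummat (pvCoord n i j) pvColA = pvCoord n (i + 1) j := by
  simp [pvSummat, pvCoord, pvColA, List.range_succ, Prod.ext_iff]
  omega

set_option maxHeartbeats 1000000 in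
lemma max4_eq (a b c d : Int) :
    (PySem.List.max? [a, b, c, d] id).getD 0 = max (max (max a b) c) d := by
  by_cases h1 : a < b <;> by_cases h2 : b < c <;> by_cases h3 : a < c <;>
    by_cases h4 : c < d <;> by_cases h5 : b < d <;> by_cases h6 : a < d <;>
    simp [PySem.List.max?, h1, h2, h3, h4, h5, h6] <;> omega

-- suma at the coordinate state = B's direct four-index max
lemma suma_coord (matrix : List (List Int)) (n i j : Int) :
    pvSuma (pvCoord n i j) matrix =
      max (max (max (pvCellB matrix i j) (pvCellB matrix i (n - 1 - j)))
               (pvCellB matrix (n - 1 - i) j))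
          (pvCellB matrix (n - 1 - i) (n - 1 - j)) := by
  simp only [pvSuma, pvCoord, List.getD, List.getElem?_cons_zero, List.getElem?_cons_succ,
    Option.getD_some]
  rw [max4_eq]
  rfl

-- A's inner accumulation loop
lemma innerA_loop (matrix : List (List Int)) (n : Int) (k : Nat) (s i : Int) (j : Int) :
    (List.range k).foldl
        (fun (st : Int × List (Int × Int)) _ =>
          (st.1 + pvSuma st.2 matrix, pvSummat st.2 pvRowA)) (s, pvCoord n i j)
      = (s + ((List.range k).map (fun t : Nat => pvSuma (pvCoord n i (j + (t : Int))) matrix)).sum,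
         pvCoord n i (j + k)) := by
  induction k with
  | zero => simp
  | succ k ih =>
    rw [List.range_succ, List.foldl_append, ih]
    simp only [List.foldl_cons, List.foldl_nil, List.map_append, List.map_cons, List.map_nil,
      List.sum_append, List.sum_cons, List.sum_nil, summat_rowA, Prod.mk.injEq]
    constructor
    · ring_nf
    · rw [show j + ((k : Int)) + 1 = j + (((k + 1 : Nat)) : Int) by push_cast; ring]

-- A's rewind loop
lemma rewind_loop (n i : Int) (k : Nat) (j : Int) :
    (List.range k).foldl (fun A _ => pvSummat A pvRowb) (pvCoord n i j)
      = pvCoord n i (j - k) := by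
  induction k with
  | zero => simp
  | succ k ih =>
    rw [List.range_succ, List.foldl_append, ih]
    simp only [List.foldl_cons, List.foldl_nil, summat_rowb]
    rw [show j - ((k : Int)) - 1 = j - (((k + 1 : Nat)) : Int) by push_cast; ring]

-- A's outer loop
lemma outerA_loop (matrix : List (List Int)) (n : Int) (le : Nat) (k : Nat) (s i : Int) :
    (List.range k).foldl
        (fun (st : Int × List (Int × Int)) _ =>
          let st2 := (List.range le).foldl
            (fun (st : Int × List (Int × Int)) _ =>
              (st.1 + pvSuma st.2 matrix, pvSummat st.2 pvRowA)) st
          let A2 := (List.range le).foldl (fun A _ => pvSummat A pvRowb) st2.2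
          (st2.1, pvSummat A2 pvColA)) (s, pvCoord n i 0)
      = (s + ((List.range k).map (fun t : Nat =>
                ((List.range le).map (fun u : Nat => pvSuma (pvCoord n (i + (t : Int)) (u : Int)) matrix)).sum)).sum,
         pvCoord n (i + k) 0) := by
  induction k generalizing s i with
  | zero => simp
  | succ k ih =>
    rw [List.range_succ, List.foldl_append, ih]
    simp only [List.foldl_cons, List.foldl_nil, List.map_append, List.map_cons, List.map_nil,
      List.sum_append, List.sum_cons, List.sum_nil]
    rw [innerA_loop, rewind_loop]
    rw [show (0 : Int) + (le : Nat) - (le : Nat) = 0 by ring]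
    simp only [summat_colA, Prod.mk.injEq]
    constructor
    · ring_nf
    · rw [show i + ((k : Int)) + 1 = i + (((k + 1 : Nat)) : Int) by push_cast; ring]

-- ===== VERDICT (by name: the statement is the Claim_ definition above) =====
theorem flipmatrix_spec : Claim_equal_flipmatrix := by
  intro matrix _ _
  show flipmatrix matrix = flipmatrix_alt matrix
  have hA0 : ([((0:Int), (0:Int)), (0, (matrix.length:Int) - 1), ((matrix.length:Int) - 1, 0),
        ((matrix.length:Int) - 1, (matrix.length:Int) - 1)] : List (Int × Int))
      = pvCoord (matrix.length) 0 0 := by simp [pvCoord]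
  simp only [flipmatrix, flipmatrix_alt]
  rw [hA0, outerA_loop]
  have hinner : ∀ (i : Nat) (t0 : Int),
      (List.range (matrix.length / 2)).foldl
        (fun (total : Int) (j : Nat) =>
          total + max (max (max (pvCellB matrix i j) (pvCellB matrix i ((matrix.length:Int) - 1 - j)))
                           (pvCellB matrix ((matrix.length:Int) - 1 - i) j))
                      (pvCellB matrix ((matrix.length:Int) - 1 - i) ((matrix.length:Int) - 1 - j))) t0
      = t0 + ((List.range (matrix.length / 2)).map
          (fun j : Nat =>
            max (max (max (pvCellB matrix i j) (pvCellB matrix i ((matrix.length:Int) - 1 - j)))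
                     (pvCellB matrix ((matrix.length:Int) - 1 - i) j))
                (pvCellB matrix ((matrix.length:Int) - 1 - i) ((matrix.length:Int) - 1 - j)))).sum :=
    fun i t0 => PySem.List.foldl_add _ _ _
  have houter := funext fun t0 : Int => funext fun i : Nat => hinner i t0
  rw [houter, PySem.List.foldl_add]
  simp [suma_coord]
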